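-- pv_equiv track=rewrite | github.com/rvdweerd/simmodel | rl_utils.py | GetSetOfPermutations
-- ===== SOURCE A (Python) =====
-- from itertools import combinations
--
-- def GetSetOfPermutations(path):
--     out=set()
--     for n in range(len(path) + 1):
--         for i in combinations(path,n):
--             if len(i)==0: continue
--             j=list(i)
--             j.sort()
--             out.add(tuple(j))
--     return out
-- ===== SOURCE B (Python) =====
-- def GetSetOfPermutations(path):
--     # BFS over "levels" of combinations: each level extends every subset of the
--     # previous level by one element taken from its remaining suffix, so each
--     # combination is built once, incrementally, instead of regenerated per size.
--     out = set()
--     level = [([], path)]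
--     while level:
--         nxt = []
--         for subset, rest in level:
--             for idx, x in enumerate(rest):
--                 c = subset + [x]
--                 out.add(tuple(sorted(c)))
--                 nxt.append((c, rest[idx + 1:]))
--         level = nxt
--     return out
-- ===== Notes on version B (the rewrite author's own statement) =====
-- stated objective: alternative
-- what changed: Replaced the per-size itertools.combinations scans (which rebuild every combination from scratch for each size n) by a single breadth-first loop that keeps each subset paired with its remaining suffix and extends it by one element per level, building every combination exactly once incrementally.
import Mathlib
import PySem

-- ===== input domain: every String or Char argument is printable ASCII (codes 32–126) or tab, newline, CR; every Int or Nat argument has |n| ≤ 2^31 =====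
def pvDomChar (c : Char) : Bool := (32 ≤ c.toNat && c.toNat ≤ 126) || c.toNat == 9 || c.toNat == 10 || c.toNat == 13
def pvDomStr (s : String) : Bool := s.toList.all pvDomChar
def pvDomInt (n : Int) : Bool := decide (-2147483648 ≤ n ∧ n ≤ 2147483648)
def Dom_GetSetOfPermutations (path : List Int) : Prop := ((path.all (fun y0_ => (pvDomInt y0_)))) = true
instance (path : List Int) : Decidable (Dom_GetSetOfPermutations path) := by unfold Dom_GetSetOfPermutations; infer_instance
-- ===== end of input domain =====

-- B replaces the per-size itertools.combinations scans by a single BFS that extends each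
-- subset with elements of its remaining suffix (objective: alternative decomposition).

-- ===== PORT A =====
-- hand port of itertools.combinations(l, n): exact lexicographic-by-position order
def pvComb : List Int → Nat → List (List Int)
  | _, 0 => [[]]
  | [], _+1 => []
  | x :: xs, n+1 => (pvComb xs n).map (fun c => x :: c) ++ pvComb xs (n+1)

def GetSetOfPermutations (path : List Int) : List (List Int) :=
  -- out = set(); for n in range(len(path)+1): for i in combinations(path, n): …
  (PySem.List.pyRange 0 ((path.length : Int) + 1) 1).foldl (fun out n =>
    (pvComb path n.toNat).foldl (fun out i =>
      if i.length = 0 then out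
      else PySem.Set.add out (PySem.List.sorted i (fun x => x) false)) out)
    (PySem.Set.empty : PySem.Set (List Int))

-- ===== PORT B =====
-- the while loop; fuel = path.length + 2 bounds its ≤ path.length + 1 iterations
def pvLoop : Nat → PySem.Set (List Int) → List (List Int × List Int) → PySem.Set (List Int)
  | 0, out, _ => out
  | fuel+1, out, level =>
    if level.isEmpty then out
    else
      let p := level.foldl (fun (acc : PySem.Set (List Int) × List (List Int × List Int)) sr =>
        (PySem.List.enumerate sr.2 0).foldl (fun acc ix =>
          (PySem.Set.add acc.1 (PySem.List.sorted (sr.1 ++ [ix.2]) (fun x => x) false),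
           acc.2 ++ [(sr.1 ++ [ix.2], PySem.List.slice sr.2 (some (ix.1 + 1)) none)])) acc)
        (out, ([] : List (List Int × List Int)))
      pvLoop fuel p.1 p.2

def GetSetOfPermutations_alt (path : List Int) : List (List Int) :=
  pvLoop (path.length + 2) PySem.Set.empty [([], path)]

-- ===== PRECONDITION & SPEC =====
def Spec_GetSetOfPermutations (path : List Int) (out : List (List Int)) : Prop := out = GetSetOfPermutations_alt path
instance (path : List Int) (out : List (List Int)) : Decidable (Spec_GetSetOfPermutations path out) := by unfold Spec_GetSetOfPermutations; infer_instance

-- ===== CLAIM (what is proved, stated in full; the proofs are below) =====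
def Claim_equal_GetSetOfPermutations : Prop := ∀ (path : List Int), Dom_GetSetOfPermutations path → Spec_GetSetOfPermutations path (GetSetOfPermutations path)

-- ===== LEMMAS AND PROOFS =====

-- combinations paired with the suffix remaining after the last chosen element
def pvCombP : List Int → Nat → List (List Int × List Int)
  | l, 0 => [([], l)]
  | [], _+1 => []
  | x :: xs, n+1 => (pvCombP xs n).map (fun p => (x :: p.1, p.2)) ++ pvCombP xs (n+1)

-- one-step extensions of a subset c by each element of the rest r
def pvExt (c : List Int) : List Int → List (List Int × List Int)
  | [] => []
  | x :: xs => (c ++ [x], xs) :: pvExt c xs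

def pvExpand (L : List (List Int × List Int)) : List (List Int × List Int) :=
  L.flatMap (fun p => pvExt p.1 p.2)

def pvAddAll (s : PySem.Set (List Int)) (L : List (List Int × List Int)) : PySem.Set (List Int) :=
  L.foldl (fun t p => PySem.Set.add t (PySem.List.sorted p.1 (fun x => x) false)) s

def pvTail (l : List Int) (k : Nat) : List (List Int × List Int) :=
  (List.range' (k+1) (l.length - k)).flatMap (pvCombP l)


-- enumerate with a shifted start
theorem pvEnum_shift (xs : List Int) (s : Int) :
    PySem.List.enumerate xs (s+1) = (PySem.List.enumerate xs s).map (fun p => (p.1+1, p.2)) := by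
  induction xs generalizing s with
  | nil => simp [PySem.List.enumerate_nil]
  | cons x xs ih => simp [PySem.List.enumerate_cons, ih]

-- the mapped enumerate of the inner loop IS pvExt
theorem pvExt_eq_map (r c : List Int) :
    (PySem.List.enumerate r 0).map
      (fun ix => (c ++ [ix.2], PySem.List.slice r (some (ix.1+1)) none)) = pvExt c r := by
  induction r generalizing c with
  | nil => simp [PySem.List.enumerate_nil, pvExt]
  | cons y ys ih =>
    rw [PySem.List.enumerate_cons]
    simp only [List.map_cons, pvExt]
    refine List.cons_eq_cons.mpr ⟨?_, ?_⟩
    · rw [show (0:Int) + 1 = 1 from rfl, PySem.List.slice_from_one]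
      rfl
    · rw [pvEnum_shift ys 0, List.map_map, ← ih c]
      apply List.map_congr_left
      intro p hp
      rcases (PySem.List.mem_enumerate_iff _ _ _).1 hp with ⟨k, hk, rfl⟩
      simp only [Function.comp]
      refine Prod.ext rfl ?_
      show PySem.List.slice (y :: ys) (some (0 + (k:Int) + 1 + 1)) none
          = PySem.List.slice ys (some (0 + (k:Int) + 1)) none
      have e1 : ((0:Int) + (k:Int) + 1 + 1) = (((k+2 : Nat) : Int)) := by push_cast; ring
      have e2 : ((0:Int) + (k:Int) + 1) = (((k+1 : Nat) : Int)) := by push_cast; ring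
      rw [e1, e2, PySem.List.slice_from_natCast, PySem.List.slice_from_natCast]
      rfl

-- generic pair fold: add each sorted first component, append each pair
theorem pvPairFold (L : List (List Int × List Int)) (s : PySem.Set (List Int))
    (acc : List (List Int × List Int)) :
    L.foldl (fun a p => (PySem.Set.add a.1 (PySem.List.sorted p.1 (fun x => x) false), a.2 ++ [p])) (s, acc)
      = (pvAddAll s L, acc ++ L) := by
  induction L generalizing s acc with
  | nil => simp [pvAddAll]
  | cons p L ih => simp [pvAddAll, List.foldl_cons, ih]

-- the inner loop of pvLoop, characterised
theorem pvInner (r c : List Int) (s : PySem.Set (List Int)) (acc : List (List Int × List Int)) :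
    (PySem.List.enumerate r 0).foldl (fun a ix =>
        (PySem.Set.add a.1 (PySem.List.sorted (c ++ [ix.2]) (fun x => x) false),
         a.2 ++ [(c ++ [ix.2], PySem.List.slice r (some (ix.1 + 1)) none)])) (s, acc)
      = (pvAddAll s (pvExt c r), acc ++ pvExt c r) := by
  have h := pvPairFold ((PySem.List.enumerate r 0).map
      (fun ix => (c ++ [ix.2], PySem.List.slice r (some (ix.1+1)) none))) s acc
  rw [List.foldl_map] at h
  rw [pvExt_eq_map r c] at h
  exact h

theorem pvAddAll_append (s : PySem.Set (List Int)) (a b : List (List Int × List Int)) :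
    pvAddAll s (a ++ b) = pvAddAll (pvAddAll s a) b := by
  simp [pvAddAll, List.foldl_append]

-- the body of one while-iteration, characterised
theorem pvLevelFold (L : List (List Int × List Int)) (out : PySem.Set (List Int))
    (acc : List (List Int × List Int)) :
    L.foldl (fun (a : PySem.Set (List Int) × List (List Int × List Int)) sr =>
        (PySem.List.enumerate sr.2 0).foldl (fun a ix =>
          (PySem.Set.add a.1 (PySem.List.sorted (sr.1 ++ [ix.2]) (fun x => x) false),
           a.2 ++ [(sr.1 ++ [ix.2], PySem.List.slice sr.2 (some (ix.1 + 1)) none)])) a) (out, acc)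
      = (pvAddAll out (pvExpand L), acc ++ pvExpand L) := by
  induction L generalizing out acc with
  | nil => simp [pvExpand, pvAddAll]
  | cons sr L ih =>
    rw [List.foldl_cons, pvInner sr.2 sr.1 out acc, ih]
    simp [pvExpand, pvAddAll_append, List.append_assoc]

theorem pvExt_cons (x : Int) (c r : List Int) :
    pvExt (x :: c) r = (pvExt c r).map (fun p => (x :: p.1, p.2)) := by
  induction r with
  | nil => simp [pvExt]
  | cons y ys ih => simp [pvExt, ih]

theorem pvExpand_append (a b : List (List Int × List Int)) :
    pvExpand (a ++ b) = pvExpand a ++ pvExpand b := by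
  simp [pvExpand]

theorem pvExpand_combP (l : List Int) (n : Nat) :
    pvExpand (pvCombP l n) = pvCombP l (n+1) := by
  induction l generalizing n with
  | nil =>
    cases n with
    | zero => simp [pvCombP, pvExpand, pvExt]
    | succ n => simp [pvCombP, pvExpand]
  | cons x xs ih =>
    cases n with
    | zero =>
      have h0 : pvExpand (pvCombP xs 0) = pvCombP xs 1 := ih 0
      have e1 : pvExpand (pvCombP (x :: xs) 0) = pvExt [] (x :: xs) := by
        simp [pvCombP, pvExpand]
      have e3 : pvExt [] xs = pvCombP xs 1 := by
        have h' : pvExpand (pvCombP xs 0) = pvExt [] xs := by simp [pvCombP, pvExpand]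
        rw [← h', h0]
      rw [e1, show pvExt [] (x :: xs) = ([x], xs) :: pvExt [] xs by simp [pvExt], e3]
      simp [pvCombP]
    | succ n =>
      have step : pvCombP (x :: xs) (n+1)
          = (pvCombP xs n).map (fun p => (x :: p.1, p.2)) ++ pvCombP xs (n+1) := rfl
      have hmap : pvExpand ((pvCombP xs n).map (fun p => (x :: p.1, p.2)))
          = (pvExpand (pvCombP xs n)).map (fun p => (x :: p.1, p.2)) := by
        simp [pvExpand, List.flatMap_map, List.map_flatMap, pvExt_cons]
      rw [step, pvExpand_append, hmap, ih n, ih (n+1)]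
      simp [pvCombP]

theorem pvCombP_nil_of_lt (l : List Int) (n : Nat) (h : l.length < n) : pvCombP l n = [] := by
  induction l generalizing n with
  | nil => cases n with
    | zero => omega
    | succ n => simp [pvCombP]
  | cons x xs ih =>
    cases n with
    | zero => omega
    | succ n =>
      have h1 : xs.length < n := by simpa using h
      simp [pvCombP, ih n h1, ih (n+1) (by omega)]

theorem pvCombP_ne_nil (l : List Int) (n : Nat) (h : n ≤ l.length) : pvCombP l n ≠ [] := by
  induction l generalizing n with
  | nil =>
    cases n with
    | zero => simp [pvCombP]
    | succ n => simp at h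
  | cons x xs ih =>
    cases n with
    | zero => simp [pvCombP]
    | succ n =>
      have h1 : n ≤ xs.length := by simpa using h
      have := ih n h1
      simp [pvCombP]
      intro hc
      exact absurd hc this

theorem pvTail_step (l : List Int) (k : Nat) (h : k ≤ l.length) :
    pvTail l k = pvCombP l (k+1) ++ pvTail l (k+1) := by
  unfold pvTail
  by_cases hk : k = l.length
  · subst hk
    simp [pvCombP_nil_of_lt l (l.length + 1) (by omega)]
  · have hlt : k < l.length := lt_of_le_of_ne h hk
    rw [show l.length - k = (l.length - (k+1)) + 1 by omega, List.range'_succ]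
    simp

theorem pvTail_nil (l : List Int) (k : Nat) (h : l.length ≤ k) : pvTail l k = [] := by
  unfold pvTail
  rw [Nat.sub_eq_zero_of_le h]
  simp

theorem pvLoop_eq (fuel : Nat) : ∀ (k : Nat) (out : PySem.Set (List Int)) (l : List Int),
    l.length + 1 ≤ k + fuel → pvLoop fuel out (pvCombP l k) = pvAddAll out (pvTail l k) := by
  induction fuel with
  | zero =>
    intro k out l h
    rw [pvCombP_nil_of_lt l k (by omega), pvTail_nil l k (by omega)]
    simp [pvLoop, pvAddAll]
  | succ fuel ih =>
    intro k out l h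
    by_cases hk : k ≤ l.length
    · have hne : pvCombP l k ≠ [] := pvCombP_ne_nil l k hk
      rw [pvLoop]
      rw [if_neg (by simpa [List.isEmpty_iff] using hne)]
      simp only []
      rw [pvLevelFold (pvCombP l k) out [], List.nil_append, pvExpand_combP l k]
      rw [ih (k+1) _ l (by omega)]
      rw [pvTail_step l k hk, pvAddAll_append]
    · rw [pvCombP_nil_of_lt l k (by omega), pvTail_nil l k (by omega)]
      simp [pvLoop, pvAddAll]

-- ===== A side =====

theorem pvComb_fst (l : List Int) (n : Nat) : pvComb l n = (pvCombP l n).map Prod.fst := by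
  induction l generalizing n with
  | nil => cases n <;> simp [pvComb, pvCombP]
  | cons x xs ih =>
    cases n with
    | zero => simp [pvComb, pvCombP]
    | succ n => simp [pvComb, pvCombP, ih, List.map_map, Function.comp]

theorem pvComb_len (l : List Int) (n : Nat) (i : List Int) (h : i ∈ pvComb l n) :
    i.length = n := by
  induction l generalizing n i with
  | nil => cases n with
    | zero => simp [pvComb] at h; simp [h]
    | succ n => simp [pvComb] at h
  | cons x xs ih =>
    cases n with
    | zero => simp [pvComb] at h; simp [h]
    | succ n =>
      simp only [pvComb, List.mem_append, List.mem_map] at h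
      rcases h with ⟨c, hc, rfl⟩ | h
      · simp [ih n c hc]
      · exact ih (n+1) i h

theorem pvFoldComb (L : List (List Int)) (h : ∀ i ∈ L, i.length ≠ 0)
    (out : PySem.Set (List Int)) :
    L.foldl (fun out i =>
        if i.length = 0 then out
        else PySem.Set.add out (PySem.List.sorted i (fun x => x) false)) out
      = L.foldl (fun out i => PySem.Set.add out (PySem.List.sorted i (fun x => x) false)) out := by
  induction L generalizing out with
  | nil => rfl
  | cons i L ih =>
    simp only [List.foldl_cons, if_neg (h i (List.mem_cons_self))]
    exact ih (fun j hj => h j (List.mem_cons_of_mem _ hj)) _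

theorem pvRangeFold (l : List Int) (ks : List Nat) (out : PySem.Set (List Int)) :
    ks.foldl (fun o k => pvAddAll o (pvCombP l k)) out
      = pvAddAll out (ks.flatMap (pvCombP l)) := by
  induction ks generalizing out with
  | nil => simp [pvAddAll]
  | cons k ks ih => simp [List.foldl_cons, ih, pvAddAll_append]

theorem pvCombP_zero (l : List Int) : pvCombP l 0 = [([], l)] := by
  cases l <;> rfl

theorem pvFoldlCongr {α β : Type} (L : List β) (f g : α → β → α)
    (h : ∀ a b, b ∈ L → f a b = g a b) : ∀ a, L.foldl f a = L.foldl g a := by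
  induction L with
  | nil => intro a; rfl
  | cons b L ih =>
    intro a
    rw [List.foldl_cons, List.foldl_cons, h a b (List.mem_cons_self)]
    exact ih (fun a c hc => h a c (List.mem_cons_of_mem _ hc)) _

theorem pvA_eq (path : List Int) :
    GetSetOfPermutations path = pvAddAll PySem.Set.empty (pvTail path 0) := by
  unfold GetSetOfPermutations
  have hr : PySem.List.pyRange 0 ((path.length : Int) + 1) 1
      = (List.range (path.length + 1)).map (fun k : Nat => (k : Int)) := by
    have ht : ((path.length : Int) + 1 - 0).toNat = path.length + 1 := by omega
    rw [PySem.List.pyRange_one, ht]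
    apply List.map_congr_left
    intro k _
    omega
  rw [hr, List.foldl_map]
  have hbody : ∀ (out : PySem.Set (List Int)) (k : Nat), k ∈ List.range (path.length + 1) →
      (pvComb path (Int.toNat (k : Int))).foldl (fun out i =>
          if i.length = 0 then out
          else PySem.Set.add out (PySem.List.sorted i (fun x => x) false)) out
        = (if k = 0 then out else pvAddAll out (pvCombP path k)) := by
    intro out k _
    rw [Int.toNat_natCast]
    by_cases hk : k = 0
    · subst hk; simp [pvComb]
    · rw [if_neg hk]
      rw [pvFoldComb (pvComb path k)
        (fun i hi => by rw [pvComb_len path k i hi]; exact hk)]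
      rw [pvComb_fst, List.foldl_map]
      rfl
  have hstep : (List.range (path.length + 1)).foldl
        (fun (out : PySem.Set (List Int)) (k : Nat) => if k = 0 then out else pvAddAll out (pvCombP path k))
        PySem.Set.empty
      = pvAddAll PySem.Set.empty (pvTail path 0) := by
    have hsplit : List.range (path.length + 1) = 0 :: List.range' 1 path.length := by
      rw [List.range_eq_range']; rfl
    rw [hsplit, List.foldl_cons, if_pos rfl]
    have hcong := pvFoldlCongr (List.range' 1 path.length)
        (fun out k => if k = 0 then out else pvAddAll out (pvCombP path k))
        (fun out k => pvAddAll out (pvCombP path k))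
        (fun a k hk => by
          have h1 : 1 ≤ k := (List.mem_range'_1.mp hk).1
          show (if k = 0 then a else pvAddAll a (pvCombP path k)) = pvAddAll a (pvCombP path k)
          rw [if_neg (by omega)])
        PySem.Set.empty
    rw [hcong, pvRangeFold]
    unfold pvTail
    rw [Nat.sub_zero]
  refine Eq.trans (pvFoldlCongr _ _ _ ?_ _) hstep
  intro out k hk
  exact hbody out k hk


-- ===== VERDICT (by name: the statement is the Claim_ definition above) =====
theorem GetSetOfPermutations_spec : Claim_equal_GetSetOfPermutations := by
  intro path _
  unfold Spec_GetSetOfPermutations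
  rw [pvA_eq]
  unfold GetSetOfPermutations_alt
  rw [show ([(([] : List Int), path)]) = pvCombP path 0 from (pvCombP_zero path).symm]
  rw [pvLoop_eq (path.length + 2) 0 PySem.Set.empty path (by omega)]
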